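-- pv_equiv track=rewrite | github.com/PWinwon/TIL | programmers/level2/멀쩡한사각형.py | solution
-- ===== SOURCE A (Python) =====
-- def solution(w,h):
--     answer = w * h
--     width = w
--     height = h
--     cross = 0
--     G = 1
--     num = 2
--     while num <= w or num <= h:
--         if width % num == 0 and height % num == 0:
--             G *= num
--             width = width // num
--             height = height // num
--             continue
--         num += 1
--     cross = G * (width + height - 1)
--     answer -= cross
--     return answer
-- ===== SOURCE B (Python) =====
-- def solution(w, h):
--     a, b = abs(w), abs(h)
--     while b:
--         a, b = b, a % b
--     return w * h - (w + h - a)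
-- ===== Notes on version B (the rewrite author's own statement) =====
-- stated objective: faster
-- what changed: Replaces A's trial-division factor-accumulation loop (scanning num = 2..max(w,h) and maintaining reduced width/height and accumulated G) by the Euclidean algorithm on |w|,|h| and the algebraic identity G*(w/G+h/G-1) = w+h-G, so B is a single O(log) gcd loop plus a closed-form expression.
-- intended difference: On degenerate inputs with w <= 1 and h <= 1 whose gcd is not 1 (both dimensions non-positive), A's factor loop never runs and leaves its stale G = 1, returning w*h - (w+h-1) (in particular 1 for the empty 0x0 rectangle); B returns the uniform formula w*h - (w+h-gcd(|w|,|h|)) (0 for the 0x0 rectangle), which is the intended value of the identity the function implements. — e.g. on solution(0, 0): A returns 1, B returns 0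
import Mathlib
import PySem

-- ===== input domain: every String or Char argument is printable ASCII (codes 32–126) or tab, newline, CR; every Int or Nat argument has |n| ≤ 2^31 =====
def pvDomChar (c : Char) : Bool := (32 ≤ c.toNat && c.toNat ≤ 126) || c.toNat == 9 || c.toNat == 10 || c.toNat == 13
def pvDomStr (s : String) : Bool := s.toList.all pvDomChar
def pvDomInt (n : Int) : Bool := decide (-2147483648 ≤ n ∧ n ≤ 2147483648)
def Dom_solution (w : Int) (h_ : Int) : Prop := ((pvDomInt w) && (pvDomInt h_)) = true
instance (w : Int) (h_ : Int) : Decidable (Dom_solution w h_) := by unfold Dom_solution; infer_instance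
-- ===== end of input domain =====

-- B replaces A's trial-division factor loop by the Euclidean algorithm plus the
-- identity G*(w/G+h/G-1) = w+h-G; A = B except on D_ (w ≤ 1 ∧ h ≤ 1 with gcd ≠ 1),
-- where B's uniform value is the intended one.


-- ===== PORT A =====
-- A's while loop, step for step (same branch order, same state width/height/G/num;
-- 'continue' = recursing with the same num). The fuel argument only makes the
-- recursion total; it is chosen large enough to never run out on any input
-- (num is incremented at most (max w h_ - 1) times, and each division step
-- strictly shrinks |width| + |height|). Returns the final cross value
-- G * (width + height - 1).
def solutionLoop (w : Int) (h_ : Int) : Nat → Int → Int → Int → Int → Int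
  | 0, width, height, G, _ => G * (width + height - 1)
  | n + 1, width, height, G, num =>
    if num ≤ w ∨ num ≤ h_ then
      if PySem.Int.mod width num = 0 ∧ PySem.Int.mod height num = 0 then
        solutionLoop w h_ n (PySem.Int.floordiv width num) (PySem.Int.floordiv height num)
          (G * num) num
      else
        solutionLoop w h_ n width height G (num + 1)
    else G * (width + height - 1)

def solution (w : Int) (h_ : Int) : Int :=
  w * h_ - solutionLoop w h_ ((max w h_ - 1).toNat + w.natAbs + h_.natAbs + 1) w h_ 1 2

-- ===== PORT B =====
-- termination helper for B's Euclid loop: Python's % shrinks |b|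
theorem pymod_natAbs_lt (a b : Int) (hb : b ≠ 0) :
    (PySem.Int.mod a b).natAbs < b.natAbs := by
  rcases lt_trichotomy b 0 with hlt | heq | hgt
  · have h := PySem.Int.mod_neg_bounds a hlt
    omega
  · exact absurd heq hb
  · have h1 := PySem.Int.mod_nonneg a hgt
    have h2 := PySem.Int.mod_lt a hgt
    omega

-- Source B: a, b = abs(w), abs(h); while b: a, b = b, a % b
def euclid (a b : Int) : Int :=
  if hb : b = 0 then a else euclid b (PySem.Int.mod a b)
termination_by b.natAbs
decreasing_by exact pymod_natAbs_lt a b hb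

def solution_alt (w : Int) (h_ : Int) : Int :=
  w * h_ - (w + h_ - euclid (w.natAbs : Int) (h_.natAbs : Int))

-- ===== PRECONDITION & SPEC =====
-- On inputs with w ≤ 1 and h ≤ 1 whose gcd is not 1 (both dimensions non-positive),
-- A's factor loop never runs and leaves its stale G = 1, returning w*h - (w+h-1)
-- (in particular 1 for the empty 0×0 rectangle); B returns the uniform formula
-- w*h - (w+h-gcd(|w|,|h|)), the intended value (0 for the 0×0 rectangle).
def D_solution (w : Int) (h_ : Int) : Prop := w ≤ 1 ∧ h_ ≤ 1 ∧ Int.gcd w h_ ≠ 1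
instance (w : Int) (h_ : Int) : Decidable (D_solution w h_) := by unfold D_solution; infer_instance

def Spec_solution (w : Int) (h_ : Int) (out : Int) : Prop :=
  ¬ D_solution w h_ → out = solution_alt w h_
instance (w : Int) (h_ : Int) (out : Int) : Decidable (Spec_solution w h_ out) := by
  unfold Spec_solution; infer_instance

def pvDiffWitness_solution : Int × Int := (0, 0)
def pvDiffWitnessOut_solution : Int × Int := (1, 0)

-- ===== CLAIM (what is proved, stated in full; the proofs are below) =====
def Claim_unchanged_solution : Prop :=
  ∀ (w : Int) (h_ : Int), Dom_solution w h_ → Spec_solution w h_ (solution w h_)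
def Claim_changed_solution : Prop :=
  Dom_solution (pvDiffWitness_solution.1) (pvDiffWitness_solution.2) ∧
  D_solution (pvDiffWitness_solution.1) (pvDiffWitness_solution.2) ∧
  solution (pvDiffWitness_solution.1) (pvDiffWitness_solution.2) = pvDiffWitnessOut_solution.1 ∧
  solution_alt (pvDiffWitness_solution.1) (pvDiffWitness_solution.2) = pvDiffWitnessOut_solution.2 ∧
  pvDiffWitnessOut_solution.1 ≠ pvDiffWitnessOut_solution.2
def Claim_exact_solution : Prop :=
  ∀ (w : Int) (h_ : Int), Dom_solution w h_ → D_solution w h_ →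
    solution w h_ ≠ solution_alt w h_

-- ===== LEMMAS AND PROOFS =====

-- B's hand-written Euclid loop computes Int.gcd on non-negative arguments.
theorem euclid_eq_gcd_aux (n : Nat) : ∀ (a b : Int), b.natAbs ≤ n → 0 ≤ a → 0 ≤ b →
    euclid a b = (Int.gcd a b : Int) := by
  induction n with
  | zero =>
    intro a b hn ha _
    have hb0 : b = 0 := by omega
    subst hb0
    rw [euclid]
    simp [Int.gcd, Int.natAbs_of_nonneg ha]
  | succ n ih =>
    intro a b hn ha hb
    by_cases hb0 : b = 0
    · subst hb0
      rw [euclid]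
      simp [Int.gcd, Int.natAbs_of_nonneg ha]
    · have hbpos : 0 < b := lt_of_le_of_ne hb (Ne.symm hb0)
      rw [euclid]
      simp only [hb0, dite_false]
      rw [PySem.Int.mod_eq_emod_of_pos hbpos]
      have h1 : 0 ≤ a % b := Int.emod_nonneg a hb0
      have h2 : a % b < b := Int.emod_lt_of_pos a hbpos
      rw [ih b (a % b) (by omega) hb h1]
      rw [Int.gcd_comm b (a % b), Int.gcd_emod]

theorem euclid_eq_gcd (a b : Int) (ha : 0 ≤ a) (hb : 0 ≤ b) :
    euclid a b = (Int.gcd a b : Int) :=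
  euclid_eq_gcd_aux b.natAbs a b le_rfl ha hb

-- exact division: floordiv x num * num = x when num ∣ x
theorem floordiv_mul_cancel (x num : Int) (hd : num ∣ x) :
    PySem.Int.floordiv x num * num = x := by
  have h := PySem.Int.floordiv_mul_add_mod x num
  have hm : PySem.Int.mod x num = 0 := (PySem.Int.mod_eq_zero_iff_dvd x num).mpr hd
  omega

-- exact division by num ≥ 2 shrinks the absolute value (strictly, off 0)
theorem natAbs_floordiv_lt (x num : Int) (h2 : 2 ≤ num) (hd : num ∣ x) :
    (PySem.Int.floordiv x num).natAbs ≤ x.natAbs ∧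
      (x ≠ 0 → (PySem.Int.floordiv x num).natAbs < x.natAbs) := by
  have hc := floordiv_mul_cancel x num hd
  set q := PySem.Int.floordiv x num with hq
  have habs : q.natAbs * num.natAbs = x.natAbs := by
    rw [← Int.natAbs_mul, hc]
  have hnum : 2 ≤ num.natAbs := by omega
  constructor
  · nlinarith [Nat.zero_le q.natAbs]
  · intro hx
    have hq0 : q ≠ 0 := by
      intro h; rw [h] at hc; simp at hc; exact hx hc.symm
    have : 1 ≤ q.natAbs := by omega
    nlinarith

-- Main loop invariant: once the loop can run at all (max w h_ ≥ 2), it returns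
-- the cross value w + h_ - gcd w h_.
theorem solutionLoop_eq (w h_ : Int) (hmax : 2 ≤ w ∨ 2 ≤ h_) :
    ∀ (n : Nat) (width height G num : Int),
      2 ≤ num → 1 ≤ G → w = G * width → h_ = G * height →
      (∀ k : Int, 2 ≤ k → k < num → ¬(k ∣ width ∧ k ∣ height)) →
      (max w h_ + 1 - num).toNat + width.natAbs + height.natAbs < n →
      solutionLoop w h_ n width height G num = w + h_ - (Int.gcd w h_ : Int) := by
  intro n
  induction n with
  | zero => intro width height G num _ _ _ _ _ hfuel; omega
  | succ n ih =>
    intro width height G num hnum hG hw hh hinv hfuel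
    by_cases hc : num ≤ w ∨ num ≤ h_
    · rw [solutionLoop]
      simp only [hc, if_true]
      by_cases hdiv : PySem.Int.mod width num = 0 ∧ PySem.Int.mod height num = 0
      · simp only [hdiv, and_self, if_true]
        have hdw : num ∣ width := (PySem.Int.mod_eq_zero_iff_dvd width num).mp hdiv.1
        have hdh : num ∣ height := (PySem.Int.mod_eq_zero_iff_dvd height num).mp hdiv.2
        have hcw := floordiv_mul_cancel width num hdw
        have hch := floordiv_mul_cancel height num hdh
        have hnz : ¬(width = 0 ∧ height = 0) := by
          rintro ⟨h1, h2⟩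
          subst h1; subst h2
          simp at hw hh
          omega
        have hlw := natAbs_floordiv_lt width num hnum hdw
        have hlh := natAbs_floordiv_lt height num hnum hdh
        apply ih
        · exact hnum
        · nlinarith
        · rw [hw]; conv_lhs => rw [← hcw]
          ring
        · rw [hh]; conv_lhs => rw [← hch]
          ring
        · intro k hk2 hkn ⟨hk1, hk2'⟩
          exact hinv k hk2 hkn ⟨hk1.trans ⟨num, hcw.symm⟩,
            hk2'.trans ⟨num, hch.symm⟩⟩
        · rcases Classical.em (width = 0) with h0 | h0
          · have hh0 : height ≠ 0 := fun hh0 => hnz ⟨h0, hh0⟩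
            have := hlh.2 hh0
            omega
          · have := hlw.2 h0
            omega
      · simp only [hdiv, if_false]
        apply ih
        · omega
        · exact hG
        · exact hw
        · exact hh
        · intro k hk2 hkn hkd
          rcases lt_or_eq_of_le (by omega : k ≤ num) with h | h
          · exact hinv k hk2 h hkd
          · subst h
            exact hdiv ⟨(PySem.Int.mod_eq_zero_iff_dvd width k).mpr hkd.1,
              (PySem.Int.mod_eq_zero_iff_dvd height k).mpr hkd.2⟩
        · have : num ≤ max w h_ := by omega
          omega
    · rw [solutionLoop]
      simp only [hc, if_false]
      have hg1 : Int.gcd width height = 1 := by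
        by_contra hne
        rcases Nat.eq_zero_or_pos (Int.gcd width height) with h0 | hpos
        · rw [Int.gcd_eq_zero_iff] at h0
          rcases h0 with ⟨h1, h2⟩
          subst h1; subst h2
          simp at hw hh
          omega
        · have h2d : 2 ≤ Int.gcd width height := by omega
          have hdvw : (Int.gcd width height : Int) ∣ width := Int.gcd_dvd_left width height
          have hdvh : (Int.gcd width height : Int) ∣ height := Int.gcd_dvd_right width height
          have hdvW : (Int.gcd width height : Int) ∣ w := hw ▸ hdvw.mul_left G
          have hdvH : (Int.gcd width height : Int) ∣ h_ := hh ▸ hdvh.mul_left G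
          have hlt : (Int.gcd width height : Int) < num := by
            rcases hmax with h | h
            · have := Int.le_of_dvd (by omega) hdvW
              omega
            · have := Int.le_of_dvd (by omega) hdvH
              omega
          exact hinv (Int.gcd width height : Int) (by exact_mod_cast h2d) hlt ⟨hdvw, hdvh⟩
      have hgcd : Int.gcd w h_ = G.natAbs := by
        rw [hw, hh, Int.gcd_mul_left, hg1, Nat.mul_one]
      rw [hgcd]
      have hGc : ((G.natAbs : Int)) = G := Int.natAbs_of_nonneg (by omega)
      rw [hGc, hw, hh]
      ring

-- the Euclid call in solution_alt computes gcd w h_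
theorem euclid_natAbs (w h_ : Int) :
    euclid (w.natAbs : Int) (h_.natAbs : Int) = (Int.gcd w h_ : Int) := by
  rw [euclid_eq_gcd _ _ (Int.natCast_nonneg _) (Int.natCast_nonneg _)]
  simp [Int.gcd, Int.natAbs_abs]

-- A with the loop never entered (w ≤ 1 and h_ ≤ 1) returns w*h_ - (w+h_-1)
theorem solution_no_loop (w h_ : Int) (hw : w ≤ 1) (hh : h_ ≤ 1) :
    solution w h_ = w * h_ - (w + h_ - 1) := by
  unfold solution
  rw [solutionLoop]
  have hc : ¬((2:Int) ≤ w ∨ (2:Int) ≤ h_) := by omega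
  simp only [hc, if_false]
  ring

-- ===== VERDICT (by name: the statement is the Claim_ definition above) =====
theorem solution_spec : Claim_unchanged_solution := by
  intro w h_ _hdom
  unfold Spec_solution
  intro hD
  by_cases hmax : 2 ≤ w ∨ 2 ≤ h_
  · unfold solution solution_alt
    rw [euclid_natAbs]
    rw [solutionLoop_eq w h_ hmax _ w h_ 1 2 le_rfl le_rfl (by ring) (by ring)
      (by intro k hk2 hk _; omega) ?_]
    have hM := max_choice w h_
    have h1 := le_max_left w h_
    have h2 := le_max_right w h_
    omega
  · unfold D_solution at hD
    have hg : Int.gcd w h_ = 1 := by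
      by_contra hne
      exact hD ⟨by omega, by omega, hne⟩
    have hw1 : w ≤ 1 := by omega
    have hh1 : h_ ≤ 1 := by omega
    rw [solution_no_loop w h_ hw1 hh1]
    unfold solution_alt
    rw [euclid_natAbs, hg]
    norm_num

theorem solution_changed : Claim_changed_solution := by
  unfold Claim_changed_solution
  refine ⟨by decide, by decide, by decide, ?_, by decide⟩
  show solution_alt 0 0 = 0
  rw [solution_alt, euclid_natAbs]
  decide

theorem solution_tight : Claim_exact_solution := by
  intro w h_ _hdom hD
  obtain ⟨hw, hh, hg⟩ := hD
  rw [solution_no_loop w h_ hw hh]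
  unfold solution_alt
  rw [euclid_natAbs]
  have : (Int.gcd w h_ : Int) ≠ 1 := by exact_mod_cast fun h => hg (by exact_mod_cast h)
  omega
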